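-- pv_equiv track=rewrite | github.com/kanlyn1985/evt | src/enterprise_agent_kb/generated_tests.py | _prioritize_cases
-- ===== SOURCE A (Python) =====
-- def _prioritize_cases(candidate_pool: list[dict[str, str]]) -> list[dict[str, str]]:
--     prioritized: list[dict[str, str]] = []
--     used_pages: set[int] = set()
--     remainder: list[dict[str, str]] = []
--
--     for case in candidate_pool:
--         page_no = int(case.get("page_no") or 0)
--         if case.get("kind") == "page_coverage" and page_no > 0 and page_no not in used_pages:
--             prioritized.append(case)
--             used_pages.add(page_no)
--         else:
--             remainder.append(case)
--
--     remainder.sort(key=_case_priority)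
--     for case in remainder:
--         page_no = int(case.get("page_no") or 0)
--         if page_no > 0 and page_no not in used_pages:
--             prioritized.append(case)
--             used_pages.add(page_no)
--         else:
--             prioritized.append(case)
--     return prioritized
--
-- def _case_priority(case: dict[str, str]) -> tuple[int, int]:
--     kind = str(case.get("kind", ""))
--     page_no = int(case.get("page_no") or 0)
--     if kind == "page_coverage":
--         rank = 0
--     elif kind in {"evidence", "definition", "definition_detail", "network_scope"}:
--         rank = 1
--     elif kind in {"standard", "publication_date", "effective_date", "network_standard", "network_publication_date", "network_effective_date"}:
--         rank = 2
--     elif kind in {"section", "keyword_evidence", "keyword_term"}: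
--         rank = 3
--     else:
--         rank = 5
--     return (rank, page_no or 10_000)
-- ===== SOURCE B (Python) =====
-- def _prioritize_cases(candidate_pool: list[dict[str, str]]) -> list[dict[str, str]]:
--     # Decorate-sort-undecorate: one pass tags each case with a sort key
--     # (prioritized first-occurrence page_coverage cases get the minimal key (-1, 0),
--     # so the stable sort keeps them first in original order), then one stable sort.
--     used_pages: set[int] = set()
--     decorated: list[tuple[tuple[int, int], dict[str, str]]] = []
--     for case in candidate_pool:
--         page_no = int(case.get("page_no") or 0)
--         if case.get("kind") == "page_coverage" and page_no > 0 and page_no not in used_pages: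
--             used_pages.add(page_no)
--             decorated.append(((-1, 0), case))
--         else:
--             decorated.append((_priority_key(case), case))
--     decorated.sort(key=lambda item: item[0])
--     return [case for _, case in decorated]
--
--
-- def _priority_key(case: dict[str, str]) -> tuple[int, int]:
--     kind = str(case.get("kind", ""))
--     page_no = int(case.get("page_no") or 0)
--     if kind == "page_coverage":
--         rank = 0
--     elif kind in {"evidence", "definition", "definition_detail", "network_scope"}:
--         rank = 1
--     elif kind in {"standard", "publication_date", "effective_date", "network_standard", "network_publication_date", "network_effective_date"}:
--         rank = 2
--     elif kind in {"section", "keyword_evidence", "keyword_term"}: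
--         rank = 3
--     else:
--         rank = 5
--     return (rank, page_no or 10_000)
-- ===== Notes on version B (the rewrite author's own statement) =====
-- stated objective: alternative
-- what changed: Replaces A's prioritized/remainder split with a sort of the remainder plus a second append loop by a single decorate-stable-sort-undecorate pass: each case is tagged in one pass with a sort key (prioritized first-occurrence page_coverage cases get the minimal key (-1,0) so the stable sort keeps them first in original order), then one stable sort of the whole pool and an undecorate map.
import Mathlib
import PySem

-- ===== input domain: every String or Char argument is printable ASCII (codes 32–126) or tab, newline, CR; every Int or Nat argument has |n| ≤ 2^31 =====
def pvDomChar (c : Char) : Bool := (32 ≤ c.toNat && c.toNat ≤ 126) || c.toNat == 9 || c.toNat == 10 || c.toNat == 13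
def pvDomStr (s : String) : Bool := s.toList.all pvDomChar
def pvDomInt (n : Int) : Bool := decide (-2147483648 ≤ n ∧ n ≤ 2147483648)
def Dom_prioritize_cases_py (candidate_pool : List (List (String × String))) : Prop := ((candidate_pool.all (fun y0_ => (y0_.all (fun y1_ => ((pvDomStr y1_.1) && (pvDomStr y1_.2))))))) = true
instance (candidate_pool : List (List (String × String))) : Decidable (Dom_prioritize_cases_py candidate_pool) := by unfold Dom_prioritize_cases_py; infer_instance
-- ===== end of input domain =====

-- B replaces A's prioritized/remainder split and second append loop by a decorate–stable-sort–undecorate pass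
-- over the whole pool ('alternative' objective, no speed claim); return-value equivalence only (neither mutates its argument).

-- ===== PORT A =====
-- int(case.get("page_no") or 0); the .getD 0 is unreachable under Pre_ (which demands the parse succeed)
def pvPageNo (case : List (String × String)) : Int :=
  match (PySem.Dict.ofList case).get? "page_no" with
  | none => 0
  | some s => if s = "" then 0 else (PySem.Int.ofStr? s).getD 0

-- _case_priority (Source B's _priority_key is the identical function; shared helper)
def pvCaseRank (kind : String) : Int :=
    if kind = "page_coverage" then 0
    else if kind = "evidence" ∨ kind = "definition" ∨ kind = "definition_detail" ∨ kind = "network_scope" then 1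
    else if kind = "standard" ∨ kind = "publication_date" ∨ kind = "effective_date" ∨ kind = "network_standard" ∨ kind = "network_publication_date" ∨ kind = "network_effective_date" then 2
    else if kind = "section" ∨ kind = "keyword_evidence" ∨ kind = "keyword_term" then 3
    else 5


def pvCasePriority (case : List (String × String)) : Int × Int :=
  (pvCaseRank ((PySem.Dict.ofList case).getD "kind" ""), if pvPageNo case = 0 then 10000 else pvPageNo case)

-- body of A's first loop: state (prioritized, used_pages, remainder)
def pvStepA (st : List (List (String × String)) × PySem.Set Int × List (List (String × String)))
    (case : List (String × String)) :
    List (List (String × String)) × PySem.Set Int × List (List (String × String)) :=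
  if (PySem.Dict.ofList case).get? "kind" = some "page_coverage" ∧ 0 < pvPageNo case ∧ PySem.Set.contains st.2.1 (pvPageNo case) = false
  then (st.1 ++ [case], PySem.Set.add st.2.1 (pvPageNo case), st.2.2)
  else (st.1, st.2.1, st.2.2 ++ [case])

-- body of A's second loop: state (prioritized, used_pages); both branches append case
def pvStepA2 (st : List (List (String × String)) × PySem.Set Int) (case : List (String × String)) :
    List (List (String × String)) × PySem.Set Int :=
  if 0 < pvPageNo case ∧ PySem.Set.contains st.2 (pvPageNo case) = false
  then (st.1 ++ [case], PySem.Set.add st.2 (pvPageNo case))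
  else (st.1 ++ [case], st.2)

def prioritize_cases_py (candidate_pool : List (List (String × String))) : List (List (String × String)) :=
  let st := candidate_pool.foldl pvStepA ([], PySem.Set.empty, [])
  let rem := PySem.List.sorted2 st.2.2 (fun c => (pvCasePriority c).1) (fun c => (pvCasePriority c).2)
  (rem.foldl pvStepA2 (st.1, st.2.1)).1

-- ===== PORT B =====
-- body of B's single loop: state (used_pages, decorated)
def pvStepB (st : PySem.Set Int × List ((Int × Int) × List (String × String)))
    (case : List (String × String)) :
    PySem.Set Int × List ((Int × Int) × List (String × String)) :=
  if (PySem.Dict.ofList case).get? "kind" = some "page_coverage" ∧ 0 < pvPageNo case ∧ PySem.Set.contains st.1 (pvPageNo case) = false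
  then (PySem.Set.add st.1 (pvPageNo case), st.2 ++ [((-1, 0), case)])
  else (st.1, st.2 ++ [(pvCasePriority case, case)])

def prioritize_cases_py_alt (candidate_pool : List (List (String × String))) : List (List (String × String)) :=
  let st := candidate_pool.foldl pvStepB (PySem.Set.empty, [])
  (PySem.List.sorted2 st.2 (fun it => it.1.1) (fun it => it.1.2)).map (fun it => it.2)

-- ===== PRECONDITION & SPEC =====
-- Pre_ excludes exactly the pools on which Python's int(case.get("page_no") or 0) raises ValueError
-- (a present, nonempty, non-integer "page_no" string); A raises there, so nothing is claimed.
def pvPageOk (case : List (String × String)) : Bool :=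
  match (PySem.Dict.ofList case).get? "page_no" with
  | none => true
  | some s => s == "" || (PySem.Int.ofStr? s).isSome

def Pre_prioritize_cases_py (candidate_pool : List (List (String × String))) : Prop :=
  ∀ case ∈ candidate_pool, pvPageOk case = true
instance (candidate_pool : List (List (String × String))) : Decidable (Pre_prioritize_cases_py candidate_pool) := by unfold Pre_prioritize_cases_py; infer_instance

def pvWitness_prioritize_cases_py : (List (List (String × String))) :=
  [[("kind", "page_coverage"), ("page_no", "2")], [("kind", "evidence"), ("page_no", "1")], [("kind", "section")]]

def Spec_prioritize_cases_py (candidate_pool : List (List (String × String))) (out : List (List (String × String))) : Prop := out = prioritize_cases_py_alt candidate_pool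
instance (candidate_pool : List (List (String × String))) (out : List (List (String × String))) : Decidable (Spec_prioritize_cases_py candidate_pool out) := by unfold Spec_prioritize_cases_py; infer_instance

-- ===== CLAIM (what is proved, stated in full; the proofs are below) =====
def Claim_equal_prioritize_cases_py : Prop := ∀ (candidate_pool : List (List (String × String))), Dom_prioritize_cases_py candidate_pool → Pre_prioritize_cases_py candidate_pool → Spec_prioritize_cases_py candidate_pool (prioritize_cases_py candidate_pool)

-- ===== LEMMAS AND PROOFS =====

-- the tag on a non-prioritized (remainder) case, and the low-key test picking out prioritized tags
def pvTagHigh (c : List (String × String)) : (Int × Int) × List (String × String) := (pvCasePriority c, c)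
def pvTagLow (c : List (String × String)) : (Int × Int) × List (String × String) := ((-1, 0), c)
def pvLow (it : (Int × Int) × List (String × String)) : Bool := decide (it.1.1 < 0)

lemma pvRank_nonneg (c : List (String × String)) : 0 ≤ (pvCasePriority c).1 := by
  unfold pvCasePriority pvCaseRank
  split_ifs <;> norm_num

lemma insertBy_append_of_not_before {α : Type} (before : α → α → Bool) (x : α) :
    ∀ (lows hs : List α), (∀ y ∈ lows, before x y = false) →
    PySem.List.insertBy before x (lows ++ hs) = lows ++ PySem.List.insertBy before x hs := by
  intro lows
  induction lows with
  | nil => intro hs _; rfl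
  | cons y t ih =>
    intro hs h
    have hy : before x y = false := h y (by simp)
    simp only [List.cons_append, PySem.List.insertBy, hy]
    simp only [Bool.false_eq_true, if_false]
    rw [ih hs (fun z hz => h z (by simp [hz]))]

lemma insertBy_all_before {α : Type} (before : α → α → Bool) (x : α) :
    ∀ (hs : List α), (∀ y ∈ hs, before x y = true) →
    PySem.List.insertBy before x hs = x :: hs := by
  intro hs h
  cases hs with
  | nil => rfl
  | cons y t => simp [PySem.List.insertBy, h y (by simp)]

lemma foldl_insertBy_split {α : Type} (before : α → α → Bool) (low : α → Bool) (G : α → Prop)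
    (h1 : ∀ x y, G x → G y → low x = true → low y = true → before x y = false)
    (h2 : ∀ x y, G x → G y → low x = true → low y = false → before x y = true)
    (h3 : ∀ x y, G x → G y → low x = false → low y = true → before x y = false) :
    ∀ (l lows hs : List α), (∀ y ∈ l, G y) → (∀ y ∈ lows, G y ∧ low y = true) → (∀ y ∈ hs, G y ∧ low y = false) →
    l.foldl (fun acc x => PySem.List.insertBy before x acc) (lows ++ hs)
      = (lows ++ l.filter low) ++ (l.filter (fun x => !low x)).foldl (fun acc x => PySem.List.insertBy before x acc) hs := by
  intro l
  induction l with
  | nil => intro lows hs _ _ _; simp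
  | cons x t ih =>
    intro lows hs hG hlo hhi
    have hGx : G x := hG x (by simp)
    by_cases hx : low x = true
    · have step : PySem.List.insertBy before x (lows ++ hs) = (lows ++ [x]) ++ hs := by
        rw [insertBy_append_of_not_before before x lows hs
            (fun y hy => h1 x y hGx (hlo y hy).1 hx (hlo y hy).2)]
        rw [insertBy_all_before before x hs
            (fun y hy => h2 x y hGx (hhi y hy).1 hx (hhi y hy).2)]
        simp
      simp only [List.foldl_cons, step]
      rw [ih (lows ++ [x]) hs (fun y hy => hG y (by simp [hy]))
            (by intro y hy; rcases List.mem_append.mp hy with h | h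
                · exact hlo y h
                · simp only [List.mem_singleton] at h; subst h; exact ⟨hGx, hx⟩)
            hhi]
      simp [hx]
    · have hx' : low x = false := by simp [hx]
      have step : PySem.List.insertBy before x (lows ++ hs) = lows ++ PySem.List.insertBy before x hs := by
        exact insertBy_append_of_not_before before x lows hs
          (fun y hy => h3 x y hGx (hlo y hy).1 hx' (hlo y hy).2)
      simp only [List.foldl_cons, step]
      rw [ih lows (PySem.List.insertBy before x hs) (fun y hy => hG y (by simp [hy])) hlo
            (by intro y hy
                rcases (PySem.List.mem_insertBy before x y hs).mp hy with h | h
                · subst h; exact ⟨hGx, hx'⟩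
                · exact hhi y h)]
      simp [hx']

lemma insertBy_map {α β : Type} (before : β → β → Bool) (before' : α → α → Bool) (g : α → β)
    (h : ∀ a b, before (g a) (g b) = before' a b) (x : α) :
    ∀ (l : List α), PySem.List.insertBy before (g x) (l.map g) = (PySem.List.insertBy before' x l).map g := by
  intro l
  induction l with
  | nil => rfl
  | cons y t ih =>
    simp only [List.map_cons, PySem.List.insertBy, h x y]
    by_cases hb : before' x y = true
    · simp [hb]
    · simp only [Bool.not_eq_true] at hb
      simp [hb, ih]

lemma foldl_insertBy_map {α β : Type} (before : β → β → Bool) (before' : α → α → Bool) (g : α → β)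
    (h : ∀ a b, before (g a) (g b) = before' a b) :
    ∀ (l acc : List α),
    (l.map g).foldl (fun acc x => PySem.List.insertBy before x acc) (acc.map g)
      = (l.foldl (fun acc x => PySem.List.insertBy before' x acc) acc).map g := by
  intro l
  induction l with
  | nil => intro acc; rfl
  | cons x t ih =>
    intro acc
    simp only [List.map_cons, List.foldl_cons]
    rw [insertBy_map before before' g h x acc, ih]

lemma pvStepA2_fst (st : List (List (String × String)) × PySem.Set Int) (c : List (String × String)) :
    (pvStepA2 st c).1 = st.1 ++ [c] := by
  unfold pvStepA2; split_ifs <;> rfl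

lemma second_loop_fst :
    ∀ (l : List (List (String × String))) (st : List (List (String × String)) × PySem.Set Int),
    (l.foldl pvStepA2 st).1 = st.1 ++ l := by
  intro l
  induction l with
  | nil => intro st; simp
  | cons c t ih =>
    intro st
    simp only [List.foldl_cons]
    rw [ih, pvStepA2_fst]
    simp

-- the two first loops walk the pool in lockstep: same used_pages, and the decorated list's
-- low/high parts are exactly A's prioritized list and remainder
lemma fold_rel :
    ∀ (pool : List (List (String × String))) (used : PySem.Set Int)
      (pr rem : List (List (String × String))) (dec : List ((Int × Int) × List (String × String))),
    dec.filter pvLow = pr.map pvTagLow →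
    dec.filter (fun it => !pvLow it) = rem.map pvTagHigh →
    (pool.foldl pvStepB (used, dec)).1 = (pool.foldl pvStepA (pr, used, rem)).2.1 ∧
    (pool.foldl pvStepB (used, dec)).2.filter pvLow = (pool.foldl pvStepA (pr, used, rem)).1.map pvTagLow ∧
    (pool.foldl pvStepB (used, dec)).2.filter (fun it => !pvLow it) = (pool.foldl pvStepA (pr, used, rem)).2.2.map pvTagHigh := by
  intro pool
  induction pool with
  | nil => intro used pr rem dec h1 h2; exact ⟨rfl, h1, h2⟩
  | cons c t ih =>
    intro used pr rem dec h1 h2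
    simp only [List.foldl_cons]
    unfold pvStepA pvStepB
    by_cases hc : (PySem.Dict.ofList c).get? "kind" = some "page_coverage" ∧ 0 < pvPageNo c ∧ PySem.Set.contains used (pvPageNo c) = false
    · simp only [if_pos hc]
      refine ih _ _ _ _ ?_ ?_
      · rw [List.filter_append, h1]
        simp [pvLow, pvTagLow]
      · rw [List.filter_append, h2]
        simp [pvLow]
    · simp only [if_neg hc]
      refine ih _ _ _ _ ?_ ?_
      · rw [List.filter_append, h1]
        have : pvLow (pvCasePriority c, c) = false := by
          simp [pvLow]
          exact pvRank_nonneg c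
        simp [this]
      · rw [List.filter_append, h2]
        have : pvLow (pvCasePriority c, c) = false := by
          simp [pvLow]
          exact pvRank_nonneg c
        simp [this, pvTagHigh]

-- sorted2 with reverse=false is literally a left fold of lexicographic insertions
lemma sorted2_eq_foldl {α κ₁ κ₂ : Type} [LT κ₁] [DecidableLT κ₁] [LT κ₂] [DecidableLT κ₂]
    (xs : List α) (k1 : α → κ₁) (k2 : α → κ₂) :
    PySem.List.sorted2 xs k1 k2
      = xs.foldl (fun acc x => PySem.List.insertBy
          (fun a b => decide (k1 a < k1 b) || (!decide (k1 b < k1 a) && decide (k2 a < k2 b))) x acc) [] := rfl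

-- the lexicographic "before" test used on the decorated list
def pvBeforeB (a b : (Int × Int) × List (String × String)) : Bool :=
  decide (a.1.1 < b.1.1) || (!decide (b.1.1 < a.1.1) && decide (a.1.2 < b.1.2))

def pvG (it : (Int × Int) × List (String × String)) : Prop := it.1.1 < 0 → it.1 = (-1, 0)

lemma sorted2_dec_split (dec : List ((Int × Int) × List (String × String)))
    (hG : ∀ it ∈ dec, pvG it) :
    PySem.List.sorted2 dec (fun it => it.1.1) (fun it => it.1.2)
      = dec.filter pvLow ++ PySem.List.sorted2 (dec.filter (fun it => !pvLow it)) (fun it => it.1.1) (fun it => it.1.2) := by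
  rw [sorted2_eq_foldl, sorted2_eq_foldl]
  have := foldl_insertBy_split pvBeforeB pvLow pvG
    (by intro x y hx hy hlx hly
        simp only [pvLow, decide_eq_true_eq] at hlx hly
        rw [show pvBeforeB x y = pvBeforeB x y from rfl]
        unfold pvBeforeB
        rw [hx hlx, hy hly]
        norm_num)
    (by intro x y hx hy hlx hly
        simp only [pvLow, decide_eq_true_eq, decide_eq_false_iff_not, not_lt] at hlx hly
        unfold pvBeforeB
        rw [hx hlx]
        simp only [Bool.or_eq_true, decide_eq_true_eq]
        left; omega)
    (by intro x y hx hy hlx hly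
        simp only [pvLow, decide_eq_true_eq, decide_eq_false_iff_not, not_lt] at hlx hly
        unfold pvBeforeB
        rw [hy hly]
        simp only [Bool.or_eq_false_iff, decide_eq_false_iff_not, not_lt, Bool.and_eq_false_iff,
          Bool.not_eq_false', decide_eq_true_eq]
        constructor
        · omega
        · left; omega)
    dec [] [] hG (by simp) (by simp)
  simpa using this

lemma map_snd_sorted_tagHigh (rem : List (List (String × String))) :
    (PySem.List.sorted2 (rem.map pvTagHigh) (fun it => it.1.1) (fun it => it.1.2)).map (fun it => it.2)
      = PySem.List.sorted2 rem (fun c => (pvCasePriority c).1) (fun c => (pvCasePriority c).2) := by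
  rw [sorted2_eq_foldl, sorted2_eq_foldl]
  have h := foldl_insertBy_map
    (fun (a b : (Int × Int) × List (String × String)) =>
      decide (a.1.1 < b.1.1) || (!decide (b.1.1 < a.1.1) && decide (a.1.2 < b.1.2)))
    (fun (a b : List (String × String)) =>
      decide ((pvCasePriority a).1 < (pvCasePriority b).1) ||
        (!decide ((pvCasePriority b).1 < (pvCasePriority a).1) && decide ((pvCasePriority a).2 < (pvCasePriority b).2)))
    pvTagHigh (fun a b => rfl) rem []
  simp only [List.map_nil] at h
  rw [h, List.map_map]
  have hc : ((fun (it : (Int × Int) × List (String × String)) => it.2) ∘ pvTagHigh) = fun c => c := rfl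
  rw [hc]
  simp

-- ===== VERDICT (by name: the statement is the Claim_ definition above) =====
theorem prioritize_cases_py_spec : Claim_equal_prioritize_cases_py := by
  intro pool _ _
  unfold Spec_prioritize_cases_py prioritize_cases_py prioritize_cases_py_alt
  obtain ⟨hused, hlo, hhi⟩ := fold_rel pool PySem.Set.empty [] [] [] (by simp) (by simp)
  simp only []
  rw [second_loop_fst]
  have hG : ∀ it ∈ (pool.foldl pvStepB (PySem.Set.empty, [])).2, pvG it := by
    intro it hit hneg
    have hl : pvLow it = true := by simp [pvLow]; exact hneg
    have : it ∈ ((pool.foldl pvStepB (PySem.Set.empty, [])).2).filter pvLow :=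
      List.mem_filter.mpr ⟨hit, hl⟩
    rw [hlo] at this
    obtain ⟨c, _, hc⟩ := List.mem_map.mp this
    rw [← hc]
    rfl
  rw [sorted2_dec_split _ hG, hlo, hhi, List.map_append, map_snd_sorted_tagHigh, List.map_map]
  have hc : ((fun (it : (Int × Int) × List (String × String)) => it.2) ∘ pvTagLow) = fun c => c := rfl
  rw [hc]
  simp
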